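-- pv_equiv track=rewrite | github.com/sh00-git/Python-Algorithm | Lv1/나머지가 1이 되는 수 찾기.py | solution
-- ===== SOURCE A (Python) =====
-- def solution(n):
--     min_num = 0
--
--     # 큰 수부터 찾기
--     for i in range(n-1, 1, -1):
--         if n % i == 1:
--             min_num = i
--
--     # 작은 수부터 찾기
--     for i in range(1, n, 1):
--         if n % i == 1:
--             min_num = i
--             break
--
--     # 컴프리헨션 사용
--     min_num = [i for i in range(1, n) if n % i == 1][0]
--
--     return min_num
-- ===== SOURCE B (Python) =====
-- def solution(n):
--     # smallest i>1 with n % i == 1  ==  smallest divisor >1 of n-1,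
--     # found by trial division up to sqrt(n-1)
--     m = n - 1
--     d = 2
--     while d * d <= m:
--         if m % d == 0:
--             return d
--         d += 1
--     return m
-- ===== Notes on version B (the rewrite author's own statement) =====
-- stated objective: faster
-- what changed: A scans the whole range 1..n-1 three times (two loops plus a full list comprehension) to find the smallest i with n % i == 1; B computes the smallest divisor >1 of n-1 by trial division up to sqrt(n-1), returning n-1 itself when none is found.
import Mathlib
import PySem

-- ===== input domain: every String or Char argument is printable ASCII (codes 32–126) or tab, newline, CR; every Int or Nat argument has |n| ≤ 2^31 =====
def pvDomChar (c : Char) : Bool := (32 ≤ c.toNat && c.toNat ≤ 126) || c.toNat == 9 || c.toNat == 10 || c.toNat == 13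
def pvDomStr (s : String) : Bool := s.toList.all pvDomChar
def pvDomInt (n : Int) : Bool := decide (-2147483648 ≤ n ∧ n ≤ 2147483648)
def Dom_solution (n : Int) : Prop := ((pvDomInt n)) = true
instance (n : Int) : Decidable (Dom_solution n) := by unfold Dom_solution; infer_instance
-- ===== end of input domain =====

-- B replaces A's three full scans of range(1, n) by trial division up to sqrt(n-1)
-- for the smallest divisor >1 of n-1 (objective: faster, O(sqrt n) vs O(n)).

-- ===== PORT A =====
-- A's second loop ('작은 수부터 찾기') with its break:
def solutionLoop2 (n : Int) : List Int → Int → Int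
  | [], acc => acc
  | i :: rest, acc =>
      if PySem.Int.mod n i == 1 then i else solutionLoop2 n rest acc

def solution (n : Int) : Int :=
  let min_num : Int := 0
  -- 큰 수부터 찾기: for i in range(n-1, 1, -1)
  let min_num := (PySem.List.pyRange (n-1) 1 (-1)).foldl
    (fun acc i => if PySem.Int.mod n i == 1 then i else acc) min_num
  -- 작은 수부터 찾기: for i in range(1, n, 1) with break
  let min_num := solutionLoop2 n (PySem.List.pyRange 1 n 1) min_num
  -- 컴프리헨션 사용: [i for i in range(1, n) if n % i == 1][0]
  match PySem.List.pyGet?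
      ((PySem.List.pyRange 1 n 1).filter (fun i => PySem.Int.mod n i == 1)) 0 with
  | some v => v
  | none => min_num  -- unreachable under Pre_solution: Python raises IndexError here

-- ===== PORT B =====
-- decreasing: d ≤ d*d ≤ m, so m+1-d stays positive and shrinks
def trialDiv (m d : Int) : Int :=
  if h : d * d ≤ m then
    (if PySem.Int.mod m d == 0 then d else trialDiv m (d + 1))
  else m
termination_by (m + 1 - d).toNat
decreasing_by
  have hdd : d ≤ d * d := by nlinarith [mul_self_nonneg d, mul_self_nonneg (d - 1)]
  omega

def solution_alt (n : Int) : Int := trialDiv (n - 1) 2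

-- ===== PRECONDITION & SPEC =====
-- Pre_ excludes n ≤ 2, where the comprehension [i for i in range(1,n) if n % i == 1]
-- is empty and A raises IndexError.
def Pre_solution (n : Int) : Prop := 3 ≤ n
instance (n : Int) : Decidable (Pre_solution n) := by unfold Pre_solution; infer_instance
def pvWitness_solution : Int := 7

def Spec_solution (n : Int) (out : Int) : Prop := out = solution_alt n
instance (n : Int) (out : Int) : Decidable (Spec_solution n out) := by unfold Spec_solution; infer_instance

-- ===== CLAIM (what is proved, stated in full; the proofs are below) =====
def Claim_equal_solution : Prop := ∀ (n : Int), Dom_solution n → Pre_solution n → Spec_solution n (solution n)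

-- ===== LEMMAS AND PROOFS =====

lemma intdvd_of_natdvd {a : Nat} {b : Int} (hb : 0 ≤ b) (h : a ∣ b.toNat) : (a : Int) ∣ b := by
  obtain ⟨k, hk⟩ := h
  exact ⟨(k : Int), by rw [← Int.toNat_of_nonneg hb, hk]; push_cast; ring⟩

lemma natdvd_of_intdvd {a b : Int} (ha : 0 ≤ a) (hb : 0 ≤ b) (h : a ∣ b) : a.toNat ∣ b.toNat := by
  have hn := Int.natAbs_dvd_natAbs.mpr h
  have e1 : a.natAbs = a.toNat := by omega
  have e2 : b.natAbs = b.toNat := by omega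
  rwa [e1, e2] at hn

-- For 2 ≤ i, 'n % i == 1' is exactly 'i divides n-1'.
lemma modOne_iff (n i : Int) (hi : 2 ≤ i) :
    ((PySem.Int.mod n i == 1) = true) ↔ i ∣ (n - 1) := by
  rw [PySem.Int.mod_eq_emod_of_pos (by omega : (0:Int) < i), beq_iff_eq]
  constructor
  · intro h
    have : (n - 1) % i = 0 := by
      rw [Int.sub_emod, h]
      simp
    exact Int.dvd_of_emod_eq_zero this
  · intro h
    obtain ⟨k, hk⟩ := h
    have : n = i * k + 1 := by omega
    rw [this, add_comm, Int.add_mul_emod_self_left]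
    exact Int.emod_eq_of_lt (by omega) (by omega)

-- B's loop computes minFac of m (Nat) once no divisor below d exists.
lemma trialDiv_eq_minFac (m d : Int) (hm : 2 ≤ m) (hd : 2 ≤ d)
    (hdm : d ≤ (m.toNat.minFac : Int)) : trialDiv m d = (m.toNat.minFac : Int) := by
  unfold trialDiv
  split_ifs with h1 h2
  · -- d*d ≤ m and d ∣ m: d is the minFac
    have hdvd : d ∣ m := (PySem.Int.mod_eq_zero_iff_dvd m d).mp (by simpa using h2)
    have hdvdN : d.toNat ∣ m.toNat := natdvd_of_intdvd (by omega) (by omega) hdvd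
    have hle : m.toNat.minFac ≤ d.toNat := Nat.minFac_le_of_dvd (by omega) hdvdN
    omega
  · -- d*d ≤ m, d ∤ m: d < minFac, recurse
    have hne : d ≠ (m.toNat.minFac : Int) := by
      intro he
      apply h2
      have : (m.toNat.minFac : Int) ∣ m :=
        intdvd_of_natdvd (by omega) (Nat.minFac_dvd m.toNat)
      rw [he]
      simpa using (PySem.Int.mod_eq_zero_iff_dvd m _).mpr this
    exact trialDiv_eq_minFac m (d + 1) hm (by omega) (by omega)
  · -- d*d > m: m is prime, minFac m = m
    have hprime : m.toNat.Prime := by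
      by_contra hnp
      have hsq := Nat.minFac_sq_le_self (n := m.toNat) (by omega) hnp
      have h2f : 2 ≤ (m.toNat.minFac : Int) := by omega
      have : d * d ≤ (m.toNat.minFac : Int) * (m.toNat.minFac : Int) :=
        mul_le_mul hdm hdm (by omega) (by omega)
      have : ((m.toNat.minFac : Int)) * (m.toNat.minFac : Int) ≤ m := by
        have : m.toNat.minFac * m.toNat.minFac ≤ m.toNat := by
          simpa [pow_two] using hsq
        exact_mod_cast by omega
      omega
    rw [hprime.minFac_eq]
    omega
termination_by ((m.toNat.minFac : Int) - d).toNat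
decreasing_by omega

lemma two_le_minFac (m : Int) (hm : 2 ≤ m) : 2 ≤ (m.toNat.minFac : Int) := by
  have : m.toNat.minFac.Prime := Nat.minFac_prime (by omega)
  have := this.two_le
  omega

lemma minFac_le_self (m : Int) (hm : 2 ≤ m) : (m.toNat.minFac : Int) ≤ m := by
  have := Nat.minFac_le (n := m.toNat) (by omega)
  omega

-- A's comprehension, filtered over range(1, n), starts with minFac (n-1).
lemma filter_head (n : Int) (hn : 3 ≤ n) :
    ∃ rest, (PySem.List.pyRange 1 n 1).filter (fun i => PySem.Int.mod n i == 1)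
      = ((n-1).toNat.minFac : Int) :: rest := by
  set F : Int := ((n-1).toNat.minFac : Int) with hF
  have hF2 : 2 ≤ F := two_le_minFac (n-1) (by omega)
  have hFn : F < n := by have := minFac_le_self (n-1) (by omega); omega
  have hsplit : PySem.List.pyRange 1 n 1
      = PySem.List.pyRange 1 F 1 ++ PySem.List.pyRange F n 1 :=
    PySem.List.pyRange_one_append 1 F n (by omega) (by omega)
  have hcons : PySem.List.pyRange F n 1 = F :: PySem.List.pyRange (F+1) n 1 :=
    PySem.List.pyRange_one_cons (by omega)
  have hlow : (PySem.List.pyRange 1 F 1).filter (fun i => PySem.Int.mod n i == 1) = [] := by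
    rw [List.filter_eq_nil_iff]
    intro i hi
    rw [PySem.List.mem_pyRange_one] at hi
    by_cases h1 : i = 1
    · subst h1
      simp
    · intro hp
      have hdvd : i ∣ (n - 1) := (modOne_iff n i (by omega)).mp hp
      have : (n-1).toNat.minFac ≤ i.toNat :=
        Nat.minFac_le_of_dvd (by omega) (natdvd_of_intdvd (by omega) (by omega) hdvd)
      omega
  have hpF : (PySem.Int.mod n F == 1) = true := by
    rw [modOne_iff n F hF2]
    exact intdvd_of_natdvd (by omega) (Nat.minFac_dvd (n-1).toNat)
  refine ⟨(PySem.List.pyRange (F+1) n 1).filter (fun i => PySem.Int.mod n i == 1), ?_⟩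
  rw [hsplit, hcons, List.filter_append, hlow, List.nil_append, List.filter_cons, if_pos hpF]

-- ===== VERDICT (by name: the statement is the Claim_ definition above) =====
theorem solution_spec : Claim_equal_solution := by
  intro n _ hpre
  have hn : 3 ≤ n := hpre
  unfold Spec_solution solution solution_alt
  obtain ⟨rest, hr⟩ := filter_head n hn
  rw [hr, PySem.List.pyGet?_zero_cons]
  exact (trialDiv_eq_minFac (n-1) 2 (by omega) (by omega)
    (two_le_minFac (n-1) (by omega))).symm
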